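-- pv_equiv track=rewrite | github.com/CamilleAntonios/helm-best-practices | scripts/count_embedded.py | count_embedded_objects_from_text
-- ===== SOURCE A (Python) =====
-- def count_embedded_objects_from_text(yaml_content):
--     """
--     Compte les objets imbriqués dans un contenu YAML sans utiliser le module yaml.
--     Un objet imbriqué est détecté comme une clé ayant une valeur indentée (non-commentaire).
--     """
--     embedded_count = 0
--     lines = yaml_content.split('\n')
--
--     for i, line in enumerate(lines):
--         # Ignorer les lignes vides et les commentaires
--         stripped = line.lstrip()
--         if not stripped or stripped.startswith('#'):
--             continue
--
--         # Vérifier si c'est une clé au niveau racine (pas indentée ou indentation = 0)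
--         if not line.startswith(' ') and not line.startswith('\t'):
--             # C'est une clé potentielle
--             if ':' in line and not stripped.startswith('-'):
--                 # Chercher la première ligne indentée non-vide après cette clé
--                 # (en ignorant les commentaires)
--                 for j in range(i + 1, len(lines)):
--                     next_line = lines[j]
--                     next_stripped = next_line.lstrip()
--
--                     # Ignorer les lignes vides
--                     if not next_stripped:
--                         continue
--
--                     # Si on trouve une ligne indentée (pas un commentaire), c'est un objet imbriqué
--                     if len(next_line) - len(next_line.lstrip()) > 0:
--                         # Mais on doit vérifier que ce n'est pas une clé au niveau racine
--                         if next_stripped.startswith('#'):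
--                             # C'est un commentaire, on continue
--                             continue
--                         else:
--                             # C'est du contenu imbriqué
--                             embedded_count += 1
--                             break
--                     else:
--                         # Ligne sans indentation trouvée = pas d'objet imbriqué
--                         break
--
--     return embedded_count
-- ===== SOURCE B (Python) =====
-- def count_embedded_objects_from_text(yaml_content):
--     """One forward pass: keep a 'pending' flag for the last root key awaiting
--     its decisive line; count when an indented non-comment line resolves it."""
--     count = 0
--     pending = False
--     for line in yaml_content.split('\n'):
--         stripped = line.lstrip()
--         if not stripped:
--             continue
--         indent = len(line) - len(stripped)
--         is_comment = stripped.startswith('#')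
--         if indent > 0:
--             if pending and not is_comment:
--                 count += 1
--                 pending = False
--         else:
--             pending = False
--         if (not line.startswith(' ') and not line.startswith('\t')
--                 and not is_comment and ':' in line
--                 and not stripped.startswith('-')):
--             pending = True
--     return count
-- ===== Notes on version B (the rewrite author's own statement) =====
-- stated objective: simpler
-- what changed: Replaces A's nested structure (for each root key, an inner forward scan over all later lines) with a single forward pass that keeps a pending-root-key boolean flag, counting when an indented non-comment line resolves it.
import Mathlib
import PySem

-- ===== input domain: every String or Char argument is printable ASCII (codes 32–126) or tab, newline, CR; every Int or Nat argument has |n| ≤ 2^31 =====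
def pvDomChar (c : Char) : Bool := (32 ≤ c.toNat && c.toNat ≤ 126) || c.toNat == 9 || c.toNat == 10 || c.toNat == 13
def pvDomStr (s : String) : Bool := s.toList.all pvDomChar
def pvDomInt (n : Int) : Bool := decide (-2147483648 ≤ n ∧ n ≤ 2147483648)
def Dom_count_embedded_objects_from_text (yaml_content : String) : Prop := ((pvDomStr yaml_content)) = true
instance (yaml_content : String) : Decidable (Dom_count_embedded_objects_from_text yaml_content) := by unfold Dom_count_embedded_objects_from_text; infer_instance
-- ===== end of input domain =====

-- B replaces A's nested key-then-forward-scan with one forward pass maintaining a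
-- pending-root-key flag (objective: alternative/simpler decomposition, same cost class).


-- ===== PORT A =====
-- inner loop 'for j in range(i+1, len(lines))': scan the lines after the key,
-- return true iff indented non-comment content is found before a root-level line
def pvA_scan : List (List Char) → Bool
  | [] => false
  | next_line :: rest =>
    let next_stripped := PySem.Chars.lstrip next_line
    if next_stripped = [] then pvA_scan rest
    else if PySem.Chars.len next_line - PySem.Chars.len next_stripped > 0 then
      if PySem.Chars.startswith next_stripped ['#'] then pvA_scan rest
      else true
    else false

-- outer loop 'for i, line in enumerate(lines)': at each line the remaining tail is lines[i+1:]
def pvA_go : List (List Char) → Int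
  | [] => 0
  | line :: rest =>
    let stripped := PySem.Chars.lstrip line
    (if stripped = [] then 0
     else if PySem.Chars.startswith stripped ['#'] then 0
     else if !PySem.Chars.startswith line [' '] && !PySem.Chars.startswith line ['\t'] then
       if PySem.Chars.isIn [':'] line && !PySem.Chars.startswith stripped ['-'] then
         (if pvA_scan rest then 1 else 0)
       else 0
     else 0) + pvA_go rest

def count_embedded_objects_from_text (yaml_content : String) : Int :=
  pvA_go (PySem.Chars.splitOn yaml_content.toList ['\n'])

-- ===== PORT B =====
-- single pass: 'pending' = last root key still awaiting its decisive line
def pvB_go : Int → Bool → List (List Char) → Int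
  | count, _pending, [] => count
  | count, pending, line :: rest =>
    let stripped := PySem.Chars.lstrip line
    if stripped = [] then pvB_go count pending rest
    else
      let indent := PySem.Chars.len line - PySem.Chars.len stripped
      let is_comment := PySem.Chars.startswith stripped ['#']
      let state :=
        if indent > 0 then
          (if pending && !is_comment then (count + 1, false) else (count, pending))
        else (count, false)
      let pending' :=
        if !PySem.Chars.startswith line [' '] && !PySem.Chars.startswith line ['\t']
            && !is_comment && PySem.Chars.isIn [':'] line
            && !PySem.Chars.startswith stripped ['-'] then true
        else state.2
      pvB_go state.1 pending' rest

def count_embedded_objects_from_text_alt (yaml_content : String) : Int :=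
  pvB_go 0 false (PySem.Chars.splitOn yaml_content.toList ['\n'])

-- ===== PRECONDITION & SPEC =====
def Spec_count_embedded_objects_from_text (yaml_content : String) (out : Int) : Prop := out = count_embedded_objects_from_text_alt yaml_content
instance (yaml_content : String) (out : Int) : Decidable (Spec_count_embedded_objects_from_text yaml_content out) := by unfold Spec_count_embedded_objects_from_text; infer_instance

-- ===== CLAIM (what is proved, stated in full; the proofs are below) =====
def Claim_equal_count_embedded_objects_from_text : Prop := ∀ (yaml_content : String), Dom_count_embedded_objects_from_text yaml_content → Spec_count_embedded_objects_from_text yaml_content (count_embedded_objects_from_text yaml_content)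

-- ===== LEMMAS AND PROOFS =====

-- lstrip is a suffix, so its length is bounded by the line's length
theorem pv_lstrip_len_le (l : List Char) :
    (PySem.Chars.lstrip l).length ≤ l.length := by
  have h : (PySem.Chars.lstrip l) <:+ l := by
    simp [PySem.Chars.lstrip]
    exact List.dropWhile_suffix _
  exact h.length_le

-- main invariant: the single pass equals count + pending-resolution + A's nested count
theorem pvB_eq_pvA (ls : List (List Char)) : ∀ (count : Int) (pending : Bool),
    pvB_go count pending ls =
      count + (if pending && pvA_scan ls then 1 else 0) + pvA_go ls := by
  induction ls with
  | nil => intro count pending; simp [pvB_go, pvA_scan, pvA_go]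
  | cons line rest ih =>
    intro count pending
    by_cases hblank : PySem.Chars.lstrip line = []
    · simp only [pvB_go, pvA_scan, pvA_go, hblank, if_true]
      rw [ih]
      simp
    · have hlen : (PySem.Chars.lstrip line).length ≤ line.length := pv_lstrip_len_le line
      by_cases hind : PySem.Chars.len line - PySem.Chars.len (PySem.Chars.lstrip line) > 0
      · -- indented line (comment or content)
        have hind' : (PySem.Chars.lstrip line).length < line.length := by
          simp [PySem.Chars.len] at hind; omega
        cases hcom : PySem.Chars.startswith (PySem.Chars.lstrip line) ['#'] <;>
          cases hsc : pvA_scan rest <;>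
          cases h1 : PySem.Chars.isIn [':'] line <;>
          cases h2 : PySem.Chars.startswith (PySem.Chars.lstrip line) ['-'] <;>
          cases h3 : PySem.Chars.startswith line [' '] <;>
          cases h4 : PySem.Chars.startswith line ['\t'] <;>
          cases pending <;>
          simp [pvB_go, pvA_scan, pvA_go, hblank, hcom, hind', hsc, h1, h2, h3, h4, ih] <;>
          omega
      · -- root-level line: does not start with ' ' or '\t' (else lstrip would be shorter)
        have hind' : ¬ (PySem.Chars.lstrip line).length < line.length := by
          simp [PySem.Chars.len] at hind; omega
        have hws : PySem.Chars.startswith line [' '] = false ∧ PySem.Chars.startswith line ['\t'] = false := by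
          constructor <;> rw [← Bool.not_eq_true] <;> intro h <;>
          · rw [PySem.Chars.startswith_iff] at h
            obtain ⟨t, ht⟩ := h
            have hst : PySem.Chars.lstrip line = PySem.Chars.lstrip t := by
              simp [PySem.Chars.lstrip, ← ht, PySem.Chars.isspace]
            have hlt : (PySem.Chars.lstrip line).length ≤ t.length := by
              rw [hst]; exact pv_lstrip_len_le t
            have hl1 : line.length = t.length + 1 := by rw [← ht]; simp
            simp [PySem.Chars.len] at hind
            omega
        cases hcom : PySem.Chars.startswith (PySem.Chars.lstrip line) ['#'] <;>
          cases hsc : pvA_scan rest <;>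
          cases h1 : PySem.Chars.isIn [':'] line <;>
          cases h2 : PySem.Chars.startswith (PySem.Chars.lstrip line) ['-'] <;>
          cases pending <;>
          simp [pvB_go, pvA_scan, pvA_go, hblank, hcom, hind', hsc, h1, h2, hws.1, hws.2, ih] <;>
          omega

-- ===== VERDICT (by name: the statement is the Claim_ definition above) =====
theorem count_embedded_objects_from_text_spec : Claim_equal_count_embedded_objects_from_text := by
  intro yaml_content _
  unfold Spec_count_embedded_objects_from_text count_embedded_objects_from_text count_embedded_objects_from_text_alt
  rw [pvB_eq_pvA]
  simp
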